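-- pv_equiv track=rewrite | github.com/IgSit/ASD | ćw7/zad0 refueling tank.py | cheapest
-- ===== SOURCE A (Python) =====
-- def cheapest(prices, start, end):  # start, end - indexes
--     idx = start
--     min_price = prices[start]
--     for i in range(start, end + 1):
--         if prices[i] < min_price:
--             min_price = prices[i]
--             idx = i
--     return idx
-- ===== SOURCE B (Python) =====
-- def cheapest(prices, start, end):  # start, end - indexes
--     min_price = prices[start]
--     for i in range(start, end + 1):
--         if prices[i] < min_price:
--             min_price = prices[i]
--     for i in range(start, end + 1):
--         if prices[i] == min_price:
--             return i
--     return start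
-- ===== Notes on version B (the rewrite author's own statement) =====
-- stated objective: alternative
-- what changed: Replaced A's single fused scan that tracks (index, min) as a pair with a two-pass decomposition: one pass computes only the minimum price, a second pass returns the first index holding that value (defaulting to start on an empty range).
import Mathlib
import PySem

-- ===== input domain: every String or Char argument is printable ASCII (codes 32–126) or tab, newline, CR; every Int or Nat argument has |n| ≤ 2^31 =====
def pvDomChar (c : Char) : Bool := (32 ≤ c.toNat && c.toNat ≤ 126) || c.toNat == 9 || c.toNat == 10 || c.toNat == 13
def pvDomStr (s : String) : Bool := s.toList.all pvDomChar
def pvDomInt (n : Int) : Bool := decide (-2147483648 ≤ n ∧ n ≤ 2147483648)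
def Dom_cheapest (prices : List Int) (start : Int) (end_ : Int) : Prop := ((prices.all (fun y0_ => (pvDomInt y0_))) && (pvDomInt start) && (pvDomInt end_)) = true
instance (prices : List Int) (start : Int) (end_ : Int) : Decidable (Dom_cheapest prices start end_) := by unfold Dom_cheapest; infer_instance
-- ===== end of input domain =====

-- B replaces A's fused (index, min) scan with a two-pass decomposition: find the minimum value, then the first index holding it.


-- ===== PORT A =====
-- A: one fused scan over range(start, end+1) carrying the pair (idx, min_price).
def cheapest (prices : List Int) (start : Int) (end_ : Int) : Int :=
  ((PySem.List.pyRange start (end_ + 1) 1).foldl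
    (fun (s : Int × Int) i =>
      if PySem.List.pyGetD prices i 0 < s.2 then (i, PySem.List.pyGetD prices i 0) else s)
    (start, PySem.List.pyGetD prices start 0)).1

-- ===== PORT B =====
-- B helper: second pass — first index i in the list with prices[i] = m, else the default d.
def findIdx_alt (prices : List Int) (m : Int) (d : Int) : List Int → Int
  | [] => d
  | i :: rest => if PySem.List.pyGetD prices i 0 = m then i else findIdx_alt prices m d rest

-- B: first pass computes only the minimum value, second pass locates its first index.
def cheapest_alt (prices : List Int) (start : Int) (end_ : Int) : Int :=
  let r := PySem.List.pyRange start (end_ + 1) 1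
  let m := r.foldl
    (fun v i => if PySem.List.pyGetD prices i 0 < v then PySem.List.pyGetD prices i 0 else v)
    (PySem.List.pyGetD prices start 0)
  findIdx_alt prices m start r

-- ===== PRECONDITION & SPEC =====
-- Pre_ excludes exactly the inputs where the Python A raises IndexError: prices[start] must be a
-- valid (possibly negative) Python index, and if the range is nonempty every i in [start, end_] must be.
def Pre_cheapest (prices : List Int) (start : Int) (end_ : Int) : Prop :=
  PySem.Raise.InRange prices.length start ∧
    (start ≤ end_ → -(prices.length : Int) ≤ start ∧ end_ < (prices.length : Int))
instance (prices : List Int) (start : Int) (end_ : Int) : Decidable (Pre_cheapest prices start end_) := by unfold Pre_cheapest; infer_instance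

def pvWitness_cheapest : List Int × Int × Int := ([5, 3, 4, 3], 0, 3)

def Spec_cheapest (prices : List Int) (start : Int) (end_ : Int) (out : Int) : Prop := out = cheapest_alt prices start end_
instance (prices : List Int) (start : Int) (end_ : Int) (out : Int) : Decidable (Spec_cheapest prices start end_ out) := by unfold Spec_cheapest; infer_instance

-- ===== CLAIM (what is proved, stated in full; the proofs are below) =====
def Claim_equal_cheapest : Prop := ∀ (prices : List Int) (start : Int) (end_ : Int), Dom_cheapest prices start end_ → Pre_cheapest prices start end_ → Spec_cheapest prices start end_ (cheapest prices start end_)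

-- ===== LEMMAS AND PROOFS =====

-- the running minimum never exceeds its initial value
theorem foldMin_le (prices : List Int) (l : List Int) (v0 : Int) :
    l.foldl (fun v i => if PySem.List.pyGetD prices i 0 < v then PySem.List.pyGetD prices i 0 else v) v0 ≤ v0 := by
  induction l generalizing v0 with
  | nil => simp
  | cons i rest ih =>
    simp only [List.foldl_cons]
    split
    · exact le_of_lt (lt_of_le_of_lt (ih _) (by assumption))
    · exact ih v0

-- A's fused scan equals (first index of the min if it improved, else the initial index); the
-- second-pass default e is arbitrary, which makes the induction go through.
theorem fused_eq (prices : List Int) (l : List Int) (d e v0 : Int) :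
    l.foldl (fun (s : Int × Int) i =>
      if PySem.List.pyGetD prices i 0 < s.2 then (i, PySem.List.pyGetD prices i 0) else s) (d, v0)
    = (let m := l.foldl (fun v i => if PySem.List.pyGetD prices i 0 < v then PySem.List.pyGetD prices i 0 else v) v0
       (if m = v0 then d else findIdx_alt prices m e l, m)) := by
  induction l generalizing d v0 with
  | nil => simp
  | cons i rest ih =>
    simp only [List.foldl_cons]
    by_cases h : PySem.List.pyGetD prices i 0 < v0
    · rw [if_pos h, ih, if_pos h]
      have hle := foldMin_le prices rest (PySem.List.pyGetD prices i 0)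
      set m := rest.foldl (fun v i => if PySem.List.pyGetD prices i 0 < v then PySem.List.pyGetD prices i 0 else v) (PySem.List.pyGetD prices i 0) with hm
      have hmv : m ≠ v0 := by omega
      simp only [findIdx_alt, if_neg hmv]
      by_cases h2 : m = PySem.List.pyGetD prices i 0
      · rw [if_pos h2, if_pos (by omega : PySem.List.pyGetD prices i 0 = m)]
      · rw [if_neg h2, if_neg (by omega : ¬ PySem.List.pyGetD prices i 0 = m)]
    · rw [if_neg h, ih, if_neg h]
      have hle := foldMin_le prices rest v0
      set m := rest.foldl (fun v i => if PySem.List.pyGetD prices i 0 < v then PySem.List.pyGetD prices i 0 else v) v0 with hm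
      by_cases h2 : m = v0
      · simp [h2]
      · have : ¬ PySem.List.pyGetD prices i 0 = m := by omega
        simp only [findIdx_alt, if_neg h2, if_neg this]

-- ===== VERDICT (by name: the statement is the Claim_ definition above) =====
theorem cheapest_spec : Claim_equal_cheapest := by
  intro prices start end_ _ _
  unfold Spec_cheapest cheapest cheapest_alt
  by_cases h : start ≤ end_
  · rw [fused_eq prices _ start start]
    dsimp only
    have hc : PySem.List.pyRange start (end_ + 1) 1
        = start :: PySem.List.pyRange (start + 1) (end_ + 1) 1 :=
      PySem.List.pyRange_one_cons (by omega)
    set m := (PySem.List.pyRange start (end_ + 1) 1).foldl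
      (fun v i => if PySem.List.pyGetD prices i 0 < v then PySem.List.pyGetD prices i 0 else v)
      (PySem.List.pyGetD prices start 0) with hm
    by_cases h2 : m = PySem.List.pyGetD prices start 0
    · rw [if_pos h2, hc]
      simp [findIdx_alt, h2]
    · rw [if_neg h2]
  · rw [PySem.List.pyRange_one_eq_nil (by omega)]
    simp [findIdx_alt]
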